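-- pv_equiv track=rewrite | github.com/Narek2008654/Voice_Assistant | stt_agent.py | _number_to_armenian
-- ===== SOURCE A (Python) =====
-- _ARM_ONES = {
--     0: "\u0566\u0580\u0578", 1: "\u0574\u0565\u056f", 2: "\u0565\u0580\u056f\u0578\u0582", 3: "\u0565\u0580\u0565\u0584",
--     4: "\u0579\u0578\u0580\u057d", 5: "\u0570\u056b\u0576\u0563", 6: "\u057e\u0565\u0581", 7: "\u0575\u0578\u0569",
--     8: "\u0578\u0582\u0569", 9: "\u056b\u0576\u0576",
-- }
--
-- _ARM_TEENS = {
--     10: "\u057f\u0561\u057d", 11: "\u057f\u0561\u057d\u0576\u0574\u0565\u056f", 12: "\u057f\u0561\u057d\u0576\u0565\u0580\u056f\u0578\u0582",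
--     13: "\u057f\u0561\u057d\u0576\u0565\u0580\u0565\u0584", 14: "\u057f\u0561\u057d\u0576\u0579\u0578\u0580\u057d",
--     15: "\u057f\u0561\u057d\u0576\u0570\u056b\u0576\u0563", 16: "\u057f\u0561\u057d\u0576\u057e\u0565\u0581",
--     17: "\u057f\u0561\u057d\u0576\u0575\u0578\u0569", 18: "\u057f\u0561\u057d\u0576\u0578\u0582\u0569",
--     19: "\u057f\u0561\u057d\u0576\u056b\u0576\u0576",
-- }
--
-- _ARM_TENS = {
--     20: "\u0584\u057d\u0561\u0576", 30: "\u0565\u0580\u0565\u057d\u0578\u0582\u0576", 40: "\u0584\u0561\u057c\u0561\u057d\u0578\u0582\u0576",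
--     50: "\u0570\u056b\u057d\u0578\u0582\u0576", 60: "\u057e\u0561\u0569\u057d\u0578\u0582\u0576", 70: "\u0575\u0578\u0569\u0561\u0576\u0561\u057d\u0578\u0582\u0576",
--     80: "\u0578\u0582\u0569\u057d\u0578\u0582\u0576", 90: "\u056b\u0576\u0576\u057d\u0578\u0582\u0576",
-- }
--
-- def _number_to_armenian(n: int) -> str:
--     """Convert a non-negative integer to Armenian cardinal words."""
--     if n < 0:
--         return "\u0574\u056b\u0576\u0578\u0582\u057d " + _number_to_armenian(-n)
--     if n <= 9:
--         return _ARM_ONES[n]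
--     if n <= 19:
--         return _ARM_TEENS[n]
--     if n <= 99:
--         tens, ones = divmod(n, 10)
--         result = _ARM_TENS[tens * 10]
--         if ones:
--             result += " " + _ARM_ONES[ones]
--         return result
--     if n <= 999:
--         hundreds, remainder = divmod(n, 100)
--         result = ""
--         if hundreds == 1:
--             result = "\u0570\u0561\u0580\u0575\u0578\u0582\u0580"
--         else:
--             result = _ARM_ONES[hundreds] + " \u0570\u0561\u0580\u0575\u0578\u0582\u0580"
--         if remainder:
--             result += " " + _number_to_armenian(remainder)
--         return result
--     if n <= 999_999:
--         thousands, remainder = divmod(n, 1000)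
--         result = ""
--         if thousands == 1:
--             result = "\u0570\u0561\u0566\u0561\u0580"
--         else:
--             result = _number_to_armenian(thousands) + " \u0570\u0561\u0566\u0561\u0580"
--         if remainder:
--             result += " " + _number_to_armenian(remainder)
--         return result
--     if n <= 999_999_999:
--         millions, remainder = divmod(n, 1_000_000)
--         result = ""
--         if millions == 1:
--             result = "\u0574\u0565\u056f \u0574\u056b\u056c\u056b\u0578\u0576"
--         else:
--             result = _number_to_armenian(millions) + " \u0574\u056b\u056c\u056b\u0578\u0576"
--         if remainder:
--             result += " " + _number_to_armenian(remainder)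
--         return result
--     if n <= 999_999_999_999:
--         billions, remainder = divmod(n, 1_000_000_000)
--         result = ""
--         if billions == 1:
--             result = "\u0574\u0565\u056f \u0574\u056b\u056c\u056b\u0561\u0580\u0564"
--         else:
--             result = _number_to_armenian(billions) + " \u0574\u056b\u056c\u056b\u0561\u0580\u0564"
--         if remainder:
--             result += " " + _number_to_armenian(remainder)
--         return result
--     return str(n)
-- ===== SOURCE B (Python) =====
-- _ONES = ["զրո", "մեկ", "երկու", "երեք", "չորս", "հինգ", "վեց", "յոթ", "ութ", "ինն"]
-- _TEENS = ["տաս", "տասնմեկ", "տասներկու", "տասներեք", "տասնչորս",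
--           "տասնհինգ", "տասնվեց", "տասնյոթ", "տասնութ", "տասնինն"]
-- _TENS = ["քսան", "երեսուն", "քառասուն", "հիսուն", "վաթսուն",
--          "յոթանասուն", "ութսուն", "իննսուն"]
-- _SCALES = ["", "հազար", "միլիոն", "միլիարդ"]
--
--
-- def _small(m):
--     """Render 1..999 as words, flat (no recursion)."""
--     parts = []
--     h, m = divmod(m, 100)
--     if h == 1:
--         parts.append("հարյուր")
--     elif h:
--         parts.append(_ONES[h] + " հարյուր")
--     if 10 <= m <= 19:
--         parts.append(_TEENS[m - 10])
--     else:
--         t, o = divmod(m, 10)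
--         if t:
--             parts.append(_TENS[t - 2])
--         if o:
--             parts.append(_ONES[o])
--     return " ".join(parts)
--
--
-- def _number_to_armenian(n: int) -> str:
--     """Convert an integer to Armenian cardinal words (iterative base-1000 grouping)."""
--     if n < 0:
--         return "մինուս " + _number_to_armenian(-n)
--     if n > 999_999_999_999:
--         return str(n)
--     if n == 0:
--         return "զրո"
--     groups = []
--     while n:
--         n, g = divmod(n, 1000)
--         groups.append(g)
--     parts = []
--     for i in range(len(groups) - 1, -1, -1):
--         g = groups[i]
--         if g == 0:
--             continue
--         if i == 0:
--             parts.append(_small(g))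
--         elif g == 1 and i == 1:
--             parts.append(_SCALES[1])
--         elif g == 1:
--             parts.append("մեկ " + _SCALES[i])
--         else:
--             parts.append(_small(g) + " " + _SCALES[i])
--     return " ".join(parts)
-- ===== Notes on version B (the rewrite author's own statement) =====
-- stated objective: alternative
-- what changed: A's recursive cascade of per-scale if-blocks (recurse on quotient and remainder at each of 10^9/10^6/10^3/10^2) is replaced by an iterative base-1000 grouping: a while loop splits the number into three-digit groups, a flat non-recursive 1..999 renderer names each group, scale words come from a list indexed by group position, and the parts are joined once.
import Mathlib
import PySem

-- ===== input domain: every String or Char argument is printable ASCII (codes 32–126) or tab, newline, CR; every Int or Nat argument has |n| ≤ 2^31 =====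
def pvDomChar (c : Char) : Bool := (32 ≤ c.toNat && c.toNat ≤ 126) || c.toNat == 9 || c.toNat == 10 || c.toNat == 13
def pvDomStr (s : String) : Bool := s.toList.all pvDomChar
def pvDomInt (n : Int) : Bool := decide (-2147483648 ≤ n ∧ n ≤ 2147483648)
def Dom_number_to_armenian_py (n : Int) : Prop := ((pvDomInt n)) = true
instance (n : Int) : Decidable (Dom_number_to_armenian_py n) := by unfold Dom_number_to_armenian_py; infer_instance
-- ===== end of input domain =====

-- B replaces A's recursive cascade of per-scale branches by an iterative base-1000 grouping: split the
-- number into three-digit groups with a while loop, render each group with a flat (non-recursive)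
-- 1..999 renderer, attach scale words from a list, and join (objective: alternative decomposition);
-- return values are proved identical for all n.

-- ===== PORT A =====
def pvArmOnesD : PySem.Dict Int String := PySem.Dict.ofList [(0, "զրո"), (1, "մեկ"), (2, "երկու"), (3, "երեք"), (4, "չորս"), (5, "հինգ"), (6, "վեց"), (7, "յոթ"), (8, "ութ"), (9, "ինն")]
def pvArmTeensD : PySem.Dict Int String := PySem.Dict.ofList [(10, "տաս"), (11, "տասնմեկ"), (12, "տասներկու"), (13, "տասներեք"), (14, "տասնչորս"), (15, "տասնհինգ"), (16, "տասնվեց"), (17, "տասնյոթ"), (18, "տասնութ"), (19, "տասնինն")]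
def pvArmTensD : PySem.Dict Int String := PySem.Dict.ofList [(20, "քսան"), (30, "երեսուն"), (40, "քառասուն"), (50, "հիսուն"), (60, "վաթսուն"), (70, "յոթանասուն"), (80, "ութսուն"), (90, "իննսուն")]

-- d[k]: a KeyError is impossible on every lookup A's branches reach, so the .getD default is never used
def pvDget (d : PySem.Dict Int String) (k : Int) : String := (PySem.Dict.get? d k).getD ""

-- A's recursion, totalised with fuel; the wrapper passes fuel > 2*|n|+1, which the recursion
-- (argument strictly smaller in the measure 2*|·| + sign) never exhausts.
def pvAGo : Nat → Int → String
  | 0, _ => ""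
  | fuel+1, n =>
    if n < 0 then "մինուս " ++ pvAGo fuel (-n)
    else if n ≤ 9 then pvDget pvArmOnesD n
    else if n ≤ 19 then pvDget pvArmTeensD n
    else if n ≤ 99 then
      pvDget pvArmTensD (PySem.Int.floordiv n 10 * 10) ++
        (if PySem.Int.mod n 10 ≠ 0 then " " ++ pvDget pvArmOnesD (PySem.Int.mod n 10) else "")
    else if n ≤ 999 then
      (if PySem.Int.floordiv n 100 = 1 then "հարյուր"
       else pvDget pvArmOnesD (PySem.Int.floordiv n 100) ++ " հարյուր") ++
      (if PySem.Int.mod n 100 ≠ 0 then " " ++ pvAGo fuel (PySem.Int.mod n 100) else "")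
    else if n ≤ 999999 then
      (if PySem.Int.floordiv n 1000 = 1 then "հազար"
       else pvAGo fuel (PySem.Int.floordiv n 1000) ++ " հազար") ++
      (if PySem.Int.mod n 1000 ≠ 0 then " " ++ pvAGo fuel (PySem.Int.mod n 1000) else "")
    else if n ≤ 999999999 then
      (if PySem.Int.floordiv n 1000000 = 1 then "մեկ միլիոն"
       else pvAGo fuel (PySem.Int.floordiv n 1000000) ++ " միլիոն") ++
      (if PySem.Int.mod n 1000000 ≠ 0 then " " ++ pvAGo fuel (PySem.Int.mod n 1000000) else "")
    else if n ≤ 999999999999 then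
      (if PySem.Int.floordiv n 1000000000 = 1 then "մեկ միլիարդ"
       else pvAGo fuel (PySem.Int.floordiv n 1000000000) ++ " միլիարդ") ++
      (if PySem.Int.mod n 1000000000 ≠ 0 then " " ++ pvAGo fuel (PySem.Int.mod n 1000000000) else "")
    else PySem.Int.toStr n

def number_to_armenian_py (n : Int) : String := pvAGo (2 * n.natAbs + 2) n

-- ===== PORT B =====
def pvOnesL : List String := ["զրո", "մեկ", "երկու", "երեք", "չորս", "հինգ", "վեց", "յոթ", "ութ", "ինն"]
def pvTeensL : List String := ["տաս", "տասնմեկ", "տասներկու", "տասներեք", "տասնչորս", "տասնհինգ", "տասնվեց", "տասնյոթ", "տասնութ", "տասնինն"]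
def pvTensL : List String := ["քսան", "երեսուն", "քառասուն", "հիսուն", "վաթսուն", "յոթանասուն", "ութսուն", "իննսուն"]
def pvScalesL : List String := ["", "հազար", "միլիոն", "միլիարդ"]

-- l[i]: every index B uses is in range, so the .getD default is never used
def pvIx (l : List String) (i : Int) : String := (PySem.List.pyGet? l i).getD ""

-- _small's second stage: the teens / tens / ones words appended after the hundreds word
def pvLow (m2 : Int) : List String :=
  if 10 ≤ m2 ∧ m2 ≤ 19 then [pvIx pvTeensL (m2 - 10)]
  else
    (if PySem.Int.floordiv m2 10 ≠ 0 then [pvIx pvTensL (PySem.Int.floordiv m2 10 - 2)] else []) ++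
    (if PySem.Int.mod m2 10 ≠ 0 then [pvIx pvOnesL (PySem.Int.mod m2 10)] else [])

-- _small: flat renderer for 1..999 (hundreds part, then pvLow), joined with " "
def pvSmall (m : Int) : String :=
  PySem.Str.join " "
    ((if PySem.Int.floordiv m 100 = 1 then ["հարյուր"]
      else if PySem.Int.floordiv m 100 ≠ 0 then [pvIx pvOnesL (PySem.Int.floordiv m 100) ++ " հարյուր"]
      else []) ++
     pvLow (PySem.Int.mod m 100))

-- the 'while n:' grouping loop; it is only reached with 0 < n, and the same guard makes it well-founded
def pvGroups (n : Int) : List Int :=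
  if _h : 0 < n then PySem.Int.mod n 1000 :: pvGroups (PySem.Int.floordiv n 1000) else []
termination_by n.toNat
decreasing_by
  rw [PySem.Int.floordiv_eq_ediv_of_pos (by norm_num)]
  omega

-- body of the 'for i in range(len(groups)-1, -1, -1):' loop
def pvStep (groups : List Int) (acc : List String) (i : Int) : List String :=
  let g := (PySem.List.pyGet? groups i).getD 0
  if g = 0 then acc
  else if i = 0 then acc ++ [pvSmall g]
  else if g = 1 ∧ i = 1 then acc ++ [pvIx pvScalesL 1]
  else if g = 1 then acc ++ ["մեկ " ++ pvIx pvScalesL i]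
  else acc ++ [pvSmall g ++ " " ++ pvIx pvScalesL i]

def pvParts (groups : List Int) : List String :=
  (PySem.List.pyRange ((groups.length : Int) - 1) (-1) (-1)).foldl (pvStep groups) []

def number_to_armenian_py_alt (n : Int) : String :=
  if h : n < 0 then "մինուս " ++ number_to_armenian_py_alt (-n)
  else if 999999999999 < n then PySem.Int.toStr n
  else if n = 0 then "զրո"
  else PySem.Str.join " " (pvParts (pvGroups n))
termination_by (if n < 0 then 1 else 0 : Nat)
decreasing_by
  rw [if_neg (by omega : ¬ (-n < 0)), if_pos h]
  omega

-- ===== PRECONDITION & SPEC =====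
def Spec_number_to_armenian_py (n : Int) (out : String) : Prop := out = number_to_armenian_py_alt n
instance (n : Int) (out : String) : Decidable (Spec_number_to_armenian_py n out) := by unfold Spec_number_to_armenian_py; infer_instance

-- ===== CLAIM (what is proved, stated in full; the proofs are below) =====
def Claim_equal_number_to_armenian_py : Prop := ∀ (n : Int), Dom_number_to_armenian_py n → Spec_number_to_armenian_py n (number_to_armenian_py n)

-- ===== LEMMAS AND PROOFS =====

-- B's body on a non-negative argument (the three non-recursive branches of number_to_armenian_py_alt)
def pvNNB (n : Int) : String :=
  if 999999999999 < n then PySem.Int.toStr n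
  else if n = 0 then "զրո"
  else PySem.Str.join " " (pvParts (pvGroups n))

lemma pvAlt_nonneg (n : Int) (h : ¬ n < 0) : number_to_armenian_py_alt n = pvNNB n := by
  rw [number_to_armenian_py_alt, dif_neg h, pvNNB]

lemma pvAlt_neg (n : Int) (h : n < 0) :
    number_to_armenian_py_alt n = "մինուս " ++ pvNNB (-n) := by
  rw [number_to_armenian_py_alt, dif_pos h, pvAlt_nonneg (-n) (by omega)]

-- " ".join specializations, via the PySem.Chars.join lemmas
lemma pvJoin_singleton (x : String) : PySem.Str.join " " [x] = x := by
  simp [PySem.Str.join, PySem.Chars.join, List.intercalate, String.ofList_toList]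

lemma pvJoin_cons_cons (x y : String) (xs : List String) :
    PySem.Str.join " " (x :: y :: xs) = x ++ " " ++ PySem.Str.join " " (y :: xs) := by
  simp only [PySem.Str.join, List.map, PySem.Chars.join_cons_cons]
  rw [String.ofList_append, String.ofList_append, String.ofList_toList]; rfl

lemma pvJoin_cons (x : String) (xs : List String) :
    PySem.Str.join " " (x :: xs) = x ++ (if xs = [] then "" else " " ++ PySem.Str.join " " xs) := by
  cases xs with
  | nil => simp [pvJoin_singleton]
  | cons y ys => simp [pvJoin_cons_cons, String.append_assoc]

lemma pvGroups_pos {n : Int} (h : 0 < n) :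
    pvGroups n = n % 1000 :: pvGroups (n / 1000) := by
  rw [pvGroups, dif_pos h, PySem.Int.mod_eq_emod_of_pos (by norm_num),
     PySem.Int.floordiv_eq_ediv_of_pos (by norm_num)]

lemma pvGroups_nonpos {n : Int} (h : ¬ 0 < n) : pvGroups n = [] := by
  rw [pvGroups, dif_neg h]

lemma pvG1 {n : Int} (h1 : 1 ≤ n) (h2 : n ≤ 999) : pvGroups n = [n] := by
  rw [pvGroups_pos (by omega), pvGroups_nonpos (by omega),
     show n % 1000 = n from by omega]

lemma pvG2 {n : Int} (h1 : 1000 ≤ n) (h2 : n ≤ 999999) :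
    pvGroups n = [n % 1000, n / 1000] := by
  rw [pvGroups_pos (by omega), pvGroups_pos (by omega : 0 < n / 1000),
     pvGroups_nonpos (by omega : ¬ 0 < n / 1000 / 1000),
     show n / 1000 % 1000 = n / 1000 from by omega]

lemma pvG3 {n : Int} (h1 : 1000000 ≤ n) (h2 : n ≤ 999999999) :
    pvGroups n = [n % 1000, n / 1000 % 1000, n / 1000000] := by
  rw [pvGroups_pos (by omega), pvGroups_pos (by omega : 0 < n / 1000),
     pvGroups_pos (by omega : 0 < n / 1000 / 1000),
     pvGroups_nonpos (by omega : ¬ 0 < n / 1000 / 1000 / 1000),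
     show n / 1000 / 1000 % 1000 = n / 1000000 from by omega]

lemma pvG4 {n : Int} (h1 : 1000000000 ≤ n) (h2 : n ≤ 999999999999) :
    pvGroups n = [n % 1000, n / 1000 % 1000, n / 1000000 % 1000, n / 1000000000] := by
  rw [pvGroups_pos (by omega), pvGroups_pos (by omega : 0 < n / 1000),
     pvGroups_pos (by omega : 0 < n / 1000 / 1000),
     pvGroups_pos (by omega : 0 < n / 1000 / 1000 / 1000),
     pvGroups_nonpos (by omega : ¬ 0 < n / 1000 / 1000 / 1000 / 1000),
     show n / 1000 / 1000 % 1000 = n / 1000000 % 1000 from by omega,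
     show n / 1000 / 1000 / 1000 % 1000 = n / 1000000000 from by omega]

-- the scale heads the parts loop produces
def pvTHead (n : Int) : String :=
  if n / 1000 = 1 then "հազար" else pvSmall (n / 1000) ++ " " ++ "հազար"
def pvMHead (n : Int) : String :=
  if n / 1000000 = 1 then "մեկ " ++ "միլիոն" else pvSmall (n / 1000000) ++ " " ++ "միլիոն"
def pvBHead (n : Int) : String :=
  if n / 1000000000 = 1 then "մեկ " ++ "միլիարդ" else pvSmall (n / 1000000000) ++ " " ++ "միլիարդ"

lemma pvPT1 {n : Int} (h1 : 1 ≤ n) (h2 : n ≤ 999) :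
    pvParts (pvGroups n) = [pvSmall n] := by
  rw [pvG1 h1 h2]
  unfold pvParts
  rw [show ((([n] : List Int).length : Int) - 1) = 0 from by simp]
  rw [show PySem.List.pyRange 0 (-1) (-1) = [0] from by decide]
  simp [List.foldl, pvStep, PySem.List.pyGet?, PySem.List.pyIdx?, show ¬ n = 0 from by omega]

lemma pvPT2 {n : Int} (h1 : 1000 ≤ n) (h2 : n ≤ 999999) :
    pvParts (pvGroups n) =
      pvTHead n :: (if n % 1000 = 0 then [] else pvParts (pvGroups (n % 1000))) := by
  rw [pvG2 h1 h2]
  by_cases hr : n % 1000 = 0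
  · rw [if_pos hr]
    unfold pvParts
    rw [show ((([n % 1000, n / 1000] : List Int).length : Int) - 1) = 1 from by simp]
    rw [show PySem.List.pyRange 1 (-1) (-1) = [1, 0] from by decide]
    by_cases hq : n / 1000 = 1 <;>
      simp [List.foldl, pvStep, PySem.List.pyGet?, PySem.List.pyIdx?, pvTHead, pvIx, pvScalesL,
        hr, hq, show ¬ n / 1000 = 0 from by omega]
  · rw [if_neg hr, pvPT1 (by omega) (by omega)]
    unfold pvParts
    rw [show ((([n % 1000, n / 1000] : List Int).length : Int) - 1) = 1 from by simp]
    rw [show PySem.List.pyRange 1 (-1) (-1) = [1, 0] from by decide]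
    by_cases hq : n / 1000 = 1 <;>
      simp [List.foldl, pvStep, PySem.List.pyGet?, PySem.List.pyIdx?, pvTHead, pvIx, pvScalesL,
        hr, hq, show ¬ n / 1000 = 0 from by omega]

lemma pvPT3 {n : Int} (h1 : 1000000 ≤ n) (h2 : n ≤ 999999999) :
    pvParts (pvGroups n) =
      pvMHead n :: (if n % 1000000 = 0 then [] else pvParts (pvGroups (n % 1000000))) := by
  rw [pvG3 h1 h2]
  by_cases hr1 : n / 1000 % 1000 = 0
  · by_cases hr0 : n % 1000 = 0
    · rw [if_pos (show n % 1000000 = 0 from by omega)]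
      unfold pvParts
      rw [show ((([n % 1000, n / 1000 % 1000, n / 1000000] : List Int).length : Int) - 1) = 2 from by simp]
      rw [show PySem.List.pyRange 2 (-1) (-1) = [2, 1, 0] from by decide]
      by_cases hq : n / 1000000 = 1 <;>
        simp [List.foldl, pvStep, PySem.List.pyGet?, PySem.List.pyIdx?, pvMHead, pvIx, pvScalesL,
          hr1, hr0, hq, show ¬ n / 1000000 = 0 from by omega]
    · rw [if_neg (show ¬ n % 1000000 = 0 from by omega),
         show n % 1000000 = n % 1000 from by omega, pvPT1 (by omega) (by omega)]
      unfold pvParts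
      rw [show ((([n % 1000, n / 1000 % 1000, n / 1000000] : List Int).length : Int) - 1) = 2 from by simp]
      rw [show PySem.List.pyRange 2 (-1) (-1) = [2, 1, 0] from by decide]
      by_cases hq : n / 1000000 = 1 <;>
        simp [List.foldl, pvStep, PySem.List.pyGet?, PySem.List.pyIdx?, pvMHead, pvIx, pvScalesL,
          hr1, hr0, hq, show ¬ n / 1000000 = 0 from by omega]
  · rw [if_neg (show ¬ n % 1000000 = 0 from by omega),
       pvPT2 (show 1000 ≤ n % 1000000 from by omega) (show n % 1000000 ≤ 999999 from by omega),
       show n % 1000000 % 1000 = n % 1000 from by omega]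
    simp only [pvTHead]
    rw [show n % 1000000 / 1000 = n / 1000 % 1000 from by omega]
    by_cases hr0 : n % 1000 = 0
    · rw [if_pos hr0]
      unfold pvParts
      rw [show ((([n % 1000, n / 1000 % 1000, n / 1000000] : List Int).length : Int) - 1) = 2 from by simp]
      rw [show PySem.List.pyRange 2 (-1) (-1) = [2, 1, 0] from by decide]
      by_cases hq : n / 1000000 = 1 <;> by_cases h11 : n / 1000 % 1000 = 1 <;>
        simp [List.foldl, pvStep, PySem.List.pyGet?, PySem.List.pyIdx?, pvMHead, pvIx,
          pvScalesL, hr1, hr0, hq, h11,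
          show ¬ n / 1000000 = 0 from by omega]
    · rw [if_neg hr0, pvPT1 (by omega) (by omega)]
      unfold pvParts
      rw [show ((([n % 1000, n / 1000 % 1000, n / 1000000] : List Int).length : Int) - 1) = 2 from by simp]
      rw [show PySem.List.pyRange 2 (-1) (-1) = [2, 1, 0] from by decide]
      by_cases hq : n / 1000000 = 1 <;> by_cases h11 : n / 1000 % 1000 = 1 <;>
        simp [List.foldl, pvStep, PySem.List.pyGet?, PySem.List.pyIdx?, pvMHead, pvIx,
          pvScalesL, hr1, hr0, hq, h11,
          show ¬ n / 1000000 = 0 from by omega]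

lemma pvPT4 {n : Int} (h1 : 1000000000 ≤ n) (h2 : n ≤ 999999999999) :
    pvParts (pvGroups n) =
      pvBHead n :: (if n % 1000000000 = 0 then [] else pvParts (pvGroups (n % 1000000000))) := by
  rw [pvG4 h1 h2]
  by_cases hr2 : n / 1000000 % 1000 = 0
  · by_cases hr1 : n / 1000 % 1000 = 0
    · by_cases hr0 : n % 1000 = 0
      · rw [if_pos (show n % 1000000000 = 0 from by omega)]
        unfold pvParts
        rw [show ((([n % 1000, n / 1000 % 1000, n / 1000000 % 1000, n / 1000000000] : List Int).length : Int) - 1) = 3 from by simp]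
        rw [show PySem.List.pyRange 3 (-1) (-1) = [3, 2, 1, 0] from by decide]
        by_cases hq : n / 1000000000 = 1 <;>
          simp [List.foldl, pvStep, PySem.List.pyGet?, PySem.List.pyIdx?, pvBHead, pvIx, pvScalesL,
            hr2, hr1, hr0, hq, show ¬ n / 1000000000 = 0 from by omega]
      · rw [if_neg (show ¬ n % 1000000000 = 0 from by omega),
           show n % 1000000000 = n % 1000 from by omega, pvPT1 (by omega) (by omega)]
        unfold pvParts
        rw [show ((([n % 1000, n / 1000 % 1000, n / 1000000 % 1000, n / 1000000000] : List Int).length : Int) - 1) = 3 from by simp]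
        rw [show PySem.List.pyRange 3 (-1) (-1) = [3, 2, 1, 0] from by decide]
        by_cases hq : n / 1000000000 = 1 <;>
          simp [List.foldl, pvStep, PySem.List.pyGet?, PySem.List.pyIdx?, pvBHead, pvIx, pvScalesL,
            hr2, hr1, hr0, hq, show ¬ n / 1000000000 = 0 from by omega]
    · rw [if_neg (show ¬ n % 1000000000 = 0 from by omega),
         show n % 1000000000 = n % 1000000 from by omega,
         pvPT2 (show 1000 ≤ n % 1000000 from by omega) (show n % 1000000 ≤ 999999 from by omega),
         show n % 1000000 % 1000 = n % 1000 from by omega]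
      simp only [pvTHead]
      rw [show n % 1000000 / 1000 = n / 1000 % 1000 from by omega]
      by_cases hr0 : n % 1000 = 0
      · rw [if_pos hr0]
        unfold pvParts
        rw [show ((([n % 1000, n / 1000 % 1000, n / 1000000 % 1000, n / 1000000000] : List Int).length : Int) - 1) = 3 from by simp]
        rw [show PySem.List.pyRange 3 (-1) (-1) = [3, 2, 1, 0] from by decide]
        by_cases hq : n / 1000000000 = 1 <;> by_cases h11 : n / 1000 % 1000 = 1 <;>
          simp [List.foldl, pvStep, PySem.List.pyGet?, PySem.List.pyIdx?, pvBHead, pvIx, pvScalesL,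
            hr2, hr1, hr0, hq, h11, show ¬ n / 1000000000 = 0 from by omega]
      · rw [if_neg hr0, pvPT1 (by omega) (by omega)]
        unfold pvParts
        rw [show ((([n % 1000, n / 1000 % 1000, n / 1000000 % 1000, n / 1000000000] : List Int).length : Int) - 1) = 3 from by simp]
        rw [show PySem.List.pyRange 3 (-1) (-1) = [3, 2, 1, 0] from by decide]
        by_cases hq : n / 1000000000 = 1 <;> by_cases h11 : n / 1000 % 1000 = 1 <;>
          simp [List.foldl, pvStep, PySem.List.pyGet?, PySem.List.pyIdx?, pvBHead, pvIx, pvScalesL,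
            hr2, hr1, hr0, hq, h11, show ¬ n / 1000000000 = 0 from by omega]
  · rw [if_neg (show ¬ n % 1000000000 = 0 from by omega),
       pvPT3 (show 1000000 ≤ n % 1000000000 from by omega) (show n % 1000000000 ≤ 999999999 from by omega),
       show n % 1000000000 % 1000000 = n % 1000000 from by omega]
    simp only [pvMHead]
    rw [show n % 1000000000 / 1000000 = n / 1000000 % 1000 from by omega]
    by_cases hr1 : n / 1000 % 1000 = 0
    · by_cases hr0 : n % 1000 = 0
      · rw [if_pos (show n % 1000000 = 0 from by omega)]
        unfold pvParts
        rw [show ((([n % 1000, n / 1000 % 1000, n / 1000000 % 1000, n / 1000000000] : List Int).length : Int) - 1) = 3 from by simp]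
        rw [show PySem.List.pyRange 3 (-1) (-1) = [3, 2, 1, 0] from by decide]
        by_cases hq : n / 1000000000 = 1 <;> by_cases h21 : n / 1000000 % 1000 = 1 <;>
          simp [List.foldl, pvStep, PySem.List.pyGet?, PySem.List.pyIdx?, pvBHead, pvIx, pvScalesL,
            hr2, hr1, hr0, hq, h21, show ¬ n / 1000000000 = 0 from by omega]
      · rw [if_neg (show ¬ n % 1000000 = 0 from by omega),
           show n % 1000000 = n % 1000 from by omega, pvPT1 (by omega) (by omega)]
        unfold pvParts
        rw [show ((([n % 1000, n / 1000 % 1000, n / 1000000 % 1000, n / 1000000000] : List Int).length : Int) - 1) = 3 from by simp]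
        rw [show PySem.List.pyRange 3 (-1) (-1) = [3, 2, 1, 0] from by decide]
        by_cases hq : n / 1000000000 = 1 <;> by_cases h21 : n / 1000000 % 1000 = 1 <;>
          simp [List.foldl, pvStep, PySem.List.pyGet?, PySem.List.pyIdx?, pvBHead, pvIx, pvScalesL,
            hr2, hr1, hr0, hq, h21, show ¬ n / 1000000000 = 0 from by omega]
    · rw [if_neg (show ¬ n % 1000000 = 0 from by omega),
         pvPT2 (show 1000 ≤ n % 1000000 from by omega) (show n % 1000000 ≤ 999999 from by omega),
         show n % 1000000 % 1000 = n % 1000 from by omega]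
      simp only [pvTHead]
      rw [show n % 1000000 / 1000 = n / 1000 % 1000 from by omega]
      by_cases hr0 : n % 1000 = 0
      · rw [if_pos hr0]
        unfold pvParts
        rw [show ((([n % 1000, n / 1000 % 1000, n / 1000000 % 1000, n / 1000000000] : List Int).length : Int) - 1) = 3 from by simp]
        rw [show PySem.List.pyRange 3 (-1) (-1) = [3, 2, 1, 0] from by decide]
        by_cases hq : n / 1000000000 = 1 <;> by_cases h21 : n / 1000000 % 1000 = 1 <;>
          by_cases h11 : n / 1000 % 1000 = 1 <;>
          simp [List.foldl, pvStep, PySem.List.pyGet?, PySem.List.pyIdx?, pvBHead, pvIx, pvScalesL,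
            hr2, hr1, hr0, hq, h21, h11, show ¬ n / 1000000000 = 0 from by omega]
      · rw [if_neg hr0, pvPT1 (by omega) (by omega)]
        unfold pvParts
        rw [show ((([n % 1000, n / 1000 % 1000, n / 1000000 % 1000, n / 1000000000] : List Int).length : Int) - 1) = 3 from by simp]
        rw [show PySem.List.pyRange 3 (-1) (-1) = [3, 2, 1, 0] from by decide]
        by_cases hq : n / 1000000000 = 1 <;> by_cases h21 : n / 1000000 % 1000 = 1 <;>
          by_cases h11 : n / 1000 % 1000 = 1 <;>
          simp [List.foldl, pvStep, PySem.List.pyGet?, PySem.List.pyIdx?, pvBHead, pvIx, pvScalesL,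
            hr2, hr1, hr0, hq, h21, h11, show ¬ n / 1000000000 = 0 from by omega]

lemma pvA_small99 (f : Nat) (m : Int) (hf : 0 < f) (h1 : 1 ≤ m) (h2 : m ≤ 99) :
    pvAGo f m = pvSmall m := by
  obtain ⟨f', rfl⟩ : ∃ f'', f = f'' + 1 := ⟨f - 1, by omega⟩
  simp only [pvAGo]
  rw [if_neg (by omega : ¬ m < 0)]
  by_cases c1 : m ≤ 9
  · rw [if_pos c1]; interval_cases m <;> decide
  · rw [if_neg c1]
    by_cases c2 : m ≤ 19
    · rw [if_pos c2]; interval_cases m <;> decide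
    · rw [if_neg c2, if_pos h2]; interval_cases m <;> decide

lemma pvLow_nil_iff {r : Int} (h1 : 0 ≤ r) (h2 : r ≤ 99) : pvLow r = [] ↔ r = 0 := by
  interval_cases r <;> simp [pvLow, pvIx]

lemma pvOnes_eq {k : Int} (h1 : 2 ≤ k) (h2 : k ≤ 9) : pvDget pvArmOnesD k = pvIx pvOnesL k := by
  interval_cases k <;> decide

lemma pvSmall_low {r : Int} (h1 : 0 ≤ r) (h2 : r ≤ 99) :
    pvSmall r = PySem.Str.join " " (pvLow r) := by
  unfold pvSmall
  rw [PySem.Int.floordiv_eq_ediv_of_pos (by norm_num : (0:Int) < 100),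
     PySem.Int.mod_eq_emod_of_pos (by norm_num : (0:Int) < 100),
     show r / 100 = 0 from by omega, show r % 100 = r from by omega]
  simp

lemma pvA_small999 (f : Nat) (m : Int) (hf : 1 < f) (h1 : 1 ≤ m) (h2 : m ≤ 999) :
    pvAGo f m = pvSmall m := by
  by_cases c : m ≤ 99
  · exact pvA_small99 f m (by omega) h1 c
  · obtain ⟨f', rfl⟩ : ∃ f'', f = f'' + 1 := ⟨f - 1, by omega⟩
    simp only [pvAGo]
    rw [if_neg (by omega : ¬ m < 0), if_neg (by omega : ¬ m ≤ 9),
       if_neg (by omega : ¬ m ≤ 19), if_neg c, if_pos h2]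
    unfold pvSmall
    rw [PySem.Int.floordiv_eq_ediv_of_pos (by norm_num : (0:Int) < 100),
       PySem.Int.mod_eq_emod_of_pos (by norm_num : (0:Int) < 100)]
    by_cases hq1 : m / 100 = 1
    · rw [if_pos hq1, if_pos hq1, List.singleton_append, pvJoin_cons]
      by_cases hr0 : m % 100 = 0
      · rw [if_neg (show ¬ (m % 100 ≠ 0) from by omega),
           if_pos ((pvLow_nil_iff (by omega) (by omega)).mpr hr0)]
      · rw [if_pos (show (m % 100 ≠ 0) from hr0),
           if_neg (show ¬ pvLow (m % 100) = [] from fun h =>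
             hr0 ((pvLow_nil_iff (by omega) (by omega)).mp h))]
        rw [pvA_small99 f' (m % 100) (by omega) (by omega) (by omega),
           pvSmall_low (by omega) (by omega)]
    · rw [if_neg hq1, if_neg hq1, if_pos (show m / 100 ≠ 0 from by omega),
         List.singleton_append, pvJoin_cons,
         pvOnes_eq (show 2 ≤ m / 100 from by omega) (show m / 100 ≤ 9 from by omega)]
      by_cases hr0 : m % 100 = 0
      · rw [if_neg (show ¬ (m % 100 ≠ 0) from by omega),
           if_pos ((pvLow_nil_iff (by omega) (by omega)).mpr hr0)]
      · rw [if_pos (show (m % 100 ≠ 0) from hr0),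
           if_neg (show ¬ pvLow (m % 100) = [] from fun h =>
             hr0 ((pvLow_nil_iff (by omega) (by omega)).mp h))]
        rw [pvA_small99 f' (m % 100) (by omega) (by omega) (by omega),
           pvSmall_low (by omega) (by omega)]

lemma pvParts_ne_nil {n : Int} (h1 : 1 ≤ n) (h2 : n ≤ 999999999999) :
    pvParts (pvGroups n) ≠ [] := by
  by_cases c1 : n ≤ 999
  · rw [pvPT1 h1 c1]; simp
  · by_cases c2 : n ≤ 999999
    · rw [pvPT2 (by omega) c2]; simp
    · by_cases c3 : n ≤ 999999999
      · rw [pvPT3 (by omega) c3]; simp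
      · rw [pvPT4 (by omega) h2]; simp

lemma pv_main : ∀ (f : Nat) (n : Int), 0 ≤ n → 2 * n.natAbs < f → pvAGo f n = pvNNB n := by
  intro f
  induction f with
  | zero => intro n h0 hf; omega
  | succ f ih =>
    intro n h0 hf
    by_cases hbig : 999999999999 < n
    · simp only [pvAGo]
      rw [if_neg (by omega : ¬ n < 0), if_neg (by omega : ¬ n ≤ 9),
         if_neg (by omega : ¬ n ≤ 19), if_neg (by omega : ¬ n ≤ 99),
         if_neg (by omega : ¬ n ≤ 999), if_neg (by omega : ¬ n ≤ 999999),
         if_neg (by omega : ¬ n ≤ 999999999), if_neg (by omega : ¬ n ≤ 999999999999),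
         pvNNB, if_pos hbig]
    · rw [pvNNB, if_neg hbig]
      by_cases hz : n = 0
      · subst hz
        rw [if_pos rfl]
        simp only [pvAGo]
        norm_num
        decide
      · rw [if_neg hz]
        by_cases c1 : n ≤ 999
        · rw [pvA_small999 (f+1) n (by omega) (by omega) c1,
             pvPT1 (by omega) c1, pvJoin_singleton]
        · simp only [pvAGo]
          rw [if_neg (by omega : ¬ n < 0), if_neg (by omega : ¬ n ≤ 9),
             if_neg (by omega : ¬ n ≤ 19), if_neg (by omega : ¬ n ≤ 99), if_neg c1]
          by_cases c2 : n ≤ 999999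
          · rw [if_pos c2,
               PySem.Int.floordiv_eq_ediv_of_pos (by norm_num : (0:Int) < 1000),
               PySem.Int.mod_eq_emod_of_pos (by norm_num : (0:Int) < 1000),
               pvPT2 (by omega) c2]
            by_cases hr : n % 1000 = 0
            · rw [if_pos hr, pvJoin_cons, if_pos rfl,
                 if_neg (show ¬ (n % 1000 ≠ 0) from by omega)]
              congr 1
              rw [pvTHead]
              by_cases hq1 : n / 1000 = 1
              · rw [if_pos hq1, if_pos hq1]
              · rw [if_neg hq1, if_neg hq1,
                   pvA_small999 f (n / 1000) (by omega) (by omega) (by omega),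
                   String.append_assoc, show (" " ++ "հազար" : String) = " հազար" from rfl]
            · rw [if_neg hr, pvJoin_cons,
                 if_neg (pvParts_ne_nil (by omega) (by omega)),
                 if_pos (show n % 1000 ≠ 0 from hr),
                 ih (n % 1000) (by omega) (by omega),
                 pvNNB, if_neg (by omega : ¬ 999999999999 < n % 1000), if_neg hr]
              congr 1
              rw [pvTHead]
              by_cases hq1 : n / 1000 = 1
              · rw [if_pos hq1, if_pos hq1]
              · rw [if_neg hq1, if_neg hq1,
                   pvA_small999 f (n / 1000) (by omega) (by omega) (by omega),
                   String.append_assoc, show (" " ++ "հազար" : String) = " հազար" from rfl]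
          · rw [if_neg c2]
            by_cases c3 : n ≤ 999999999
            · rw [if_pos c3,
                 PySem.Int.floordiv_eq_ediv_of_pos (by norm_num : (0:Int) < 1000000),
                 PySem.Int.mod_eq_emod_of_pos (by norm_num : (0:Int) < 1000000),
                 pvPT3 (by omega) c3]
              by_cases hr : n % 1000000 = 0
              · rw [if_pos hr, pvJoin_cons, if_pos rfl,
                   if_neg (show ¬ (n % 1000000 ≠ 0) from by omega)]
                congr 1
                rw [pvMHead]
                by_cases hq1 : n / 1000000 = 1
                · rw [if_pos hq1, if_pos hq1]; rfl
                · rw [if_neg hq1, if_neg hq1,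
                     pvA_small999 f (n / 1000000) (by omega) (by omega) (by omega),
                     String.append_assoc, show (" " ++ "միլիոն" : String) = " միլիոն" from rfl]
              · rw [if_neg hr, pvJoin_cons,
                   if_neg (pvParts_ne_nil (by omega) (by omega)),
                   if_pos (show n % 1000000 ≠ 0 from hr),
                   ih (n % 1000000) (by omega) (by omega),
                   pvNNB, if_neg (by omega : ¬ 999999999999 < n % 1000000), if_neg hr]
                congr 1
                rw [pvMHead]
                by_cases hq1 : n / 1000000 = 1
                · rw [if_pos hq1, if_pos hq1]; rfl
                · rw [if_neg hq1, if_neg hq1,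
                     pvA_small999 f (n / 1000000) (by omega) (by omega) (by omega),
                     String.append_assoc, show (" " ++ "միլիոն" : String) = " միլիոն" from rfl]
            · rw [if_neg c3, if_pos (by omega : n ≤ 999999999999),
                 PySem.Int.floordiv_eq_ediv_of_pos (by norm_num : (0:Int) < 1000000000),
                 PySem.Int.mod_eq_emod_of_pos (by norm_num : (0:Int) < 1000000000),
                 pvPT4 (by omega) (by omega)]
              by_cases hr : n % 1000000000 = 0
              · rw [if_pos hr, pvJoin_cons, if_pos rfl,
                   if_neg (show ¬ (n % 1000000000 ≠ 0) from by omega)]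
                congr 1
                rw [pvBHead]
                by_cases hq1 : n / 1000000000 = 1
                · rw [if_pos hq1, if_pos hq1]; rfl
                · rw [if_neg hq1, if_neg hq1,
                     pvA_small999 f (n / 1000000000) (by omega) (by omega) (by omega),
                     String.append_assoc, show (" " ++ "միլիարդ" : String) = " միլիարդ" from rfl]
              · rw [if_neg hr, pvJoin_cons,
                   if_neg (pvParts_ne_nil (by omega) (by omega)),
                   if_pos (show n % 1000000000 ≠ 0 from hr),
                   ih (n % 1000000000) (by omega) (by omega),
                   pvNNB, if_neg (by omega : ¬ 999999999999 < n % 1000000000), if_neg hr]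
                congr 1
                rw [pvBHead]
                by_cases hq1 : n / 1000000000 = 1
                · rw [if_pos hq1, if_pos hq1]; rfl
                · rw [if_neg hq1, if_neg hq1,
                     pvA_small999 f (n / 1000000000) (by omega) (by omega) (by omega),
                     String.append_assoc, show (" " ++ "միլիարդ" : String) = " միլիարդ" from rfl]

-- ===== VERDICT (by name: the statement is the Claim_ definition above) =====
theorem number_to_armenian_py_spec : Claim_equal_number_to_armenian_py := by
  intro n _
  unfold Spec_number_to_armenian_py number_to_armenian_py
  by_cases hn : n < 0
  · rw [pvAlt_neg n hn,
       show (2 * n.natAbs + 2 : Nat) = (2 * n.natAbs + 1) + 1 from rfl]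
    rw [pvAGo, if_pos hn, pv_main (2 * n.natAbs + 1) (-n) (by omega) (by omega)]
  · rw [pvAlt_nonneg n hn, pv_main (2 * n.natAbs + 2) n (by omega) (by omega)]
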